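-- pv_equiv track=rewrite | github.com/pypi-data/pypi-mirror-164 | packages/sciscripts/sciscripts-3.1.1.tar.gz/sciscripts-3.1.1/sciscripts/Analysis/Stats.py | OrderKeys
-- ===== SOURCE A (Python) =====
-- def OrderKeys(Dict, FactorNames):
--     Keys = list(Dict.keys())
--     Order = sorted([_ for _ in Keys if _ in FactorNames])
--     Order += [_ for _ in Keys if _ == 'Effect']
--     Order += sorted([_ for _ in Keys if 'group' in _])
--     Order += sorted([_ for _ in Keys if _ in ('n','n1','n2')])
--     Order += sorted([_ for _ in Keys if 'mean' in _ or 'std' in _ or 'sem' in _ or 'var' in _])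
--     Order += sorted([_ for _ in Keys if _ not in Order])
--     return(Order)
-- ===== SOURCE B (Python) =====
-- def OrderKeys(Dict, FactorNames):
--     fac, eff, grp, ns, st, rest = [], [], [], [], [], []
--     for k in Dict.keys():
--         hit = False
--         if k in FactorNames:
--             fac.append(k); hit = True
--         if k == 'Effect':
--             eff.append(k); hit = True
--         if 'group' in k:
--             grp.append(k); hit = True
--         if k in ('n', 'n1', 'n2'):
--             ns.append(k); hit = True
--         if 'mean' in k or 'std' in k or 'sem' in k or 'var' in k:
--             st.append(k); hit = True
--         if not hit:
--             rest.append(k)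
--     return sorted(fac) + eff + sorted(grp) + sorted(ns) + sorted(st) + sorted(rest)
-- ===== Notes on version B (the rewrite author's own statement) =====
-- stated objective: alternative
-- what changed: Replaces six separate comprehension scans over the keys (the last re-scanning the accumulated Order list) with a single bucketing pass that appends each key to every matching category list and collects unmatched keys directly, then concatenates the sorted buckets.
import Mathlib
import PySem

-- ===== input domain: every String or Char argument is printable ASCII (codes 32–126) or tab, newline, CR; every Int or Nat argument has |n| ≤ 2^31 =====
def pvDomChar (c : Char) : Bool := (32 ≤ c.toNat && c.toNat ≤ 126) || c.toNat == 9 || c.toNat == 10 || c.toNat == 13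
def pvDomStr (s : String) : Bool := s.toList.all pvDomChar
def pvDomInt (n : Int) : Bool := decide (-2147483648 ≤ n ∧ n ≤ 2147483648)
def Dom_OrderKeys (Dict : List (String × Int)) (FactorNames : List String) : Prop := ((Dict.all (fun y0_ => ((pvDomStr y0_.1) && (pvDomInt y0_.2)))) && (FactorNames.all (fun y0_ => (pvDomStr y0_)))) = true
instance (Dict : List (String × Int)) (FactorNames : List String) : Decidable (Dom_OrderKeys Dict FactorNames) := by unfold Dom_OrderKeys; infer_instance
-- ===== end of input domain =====

-- B replaces A's six repeated scans over the keys (the last one re-scanning the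
-- accumulated Order list) with a single bucketing pass; alternative decomposition, not claimed faster.

-- ===== PORT A =====
-- the five category tests, shared by both ports (they are the literal conditions of both Pythons)
def pFac (FactorNames : List String) (k : String) : Bool := FactorNames.contains k
def pEff (k : String) : Bool := k == "Effect"
def pGrp (k : String) : Bool := PySem.Str.isIn "group" k
def pN (k : String) : Bool := k == "n" || k == "n1" || k == "n2"
def pStat (k : String) : Bool :=
  PySem.Str.isIn "mean" k || PySem.Str.isIn "std" k || PySem.Str.isIn "sem" k || PySem.Str.isIn "var" k

-- sorted(xs) with Python's default string order
def srt (xs : List String) : List String := PySem.List.sorted xs (fun x => x) false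

def OrderKeys (Dict : List (String × Int)) (FactorNames : List String) : List String :=
  let Keys := PySem.List.dedup (Dict.map Prod.fst)   -- list(Dict.keys())
  let Order := srt (Keys.filter (fun k => pFac FactorNames k))
  let Order := Order ++ Keys.filter (fun k => pEff k)
  let Order := Order ++ srt (Keys.filter (fun k => pGrp k))
  let Order := Order ++ srt (Keys.filter (fun k => pN k))
  let Order := Order ++ srt (Keys.filter (fun k => pStat k))
  let Order := Order ++ srt (Keys.filter (fun k => !(Order.contains k)))
  Order

-- ===== PORT B =====
-- one bucketing pass: append k to every matching bucket, to rest if none matched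
def stepB (FactorNames : List String)
    (a : List String × List String × List String × List String × List String × List String)
    (k : String) :
    List String × List String × List String × List String × List String × List String :=
  let (fac, eff, grp, ns, st, rest) := a
  let hit := pFac FactorNames k || pEff k || pGrp k || pN k || pStat k
  (if pFac FactorNames k then fac ++ [k] else fac,
   if pEff k then eff ++ [k] else eff,
   if pGrp k then grp ++ [k] else grp,
   if pN k then ns ++ [k] else ns,
   if pStat k then st ++ [k] else st,
   if !hit then rest ++ [k] else rest)

def OrderKeys_alt (Dict : List (String × Int)) (FactorNames : List String) : List String :=
  let Keys := PySem.List.dedup (Dict.map Prod.fst)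
  let (fac, eff, grp, ns, st, rest) :=
    Keys.foldl (stepB FactorNames) ([], [], [], [], [], [])
  srt fac ++ eff ++ srt grp ++ srt ns ++ srt st ++ srt rest

-- ===== PRECONDITION & SPEC =====
def Spec_OrderKeys (Dict : List (String × Int)) (FactorNames : List String) (out : List String) : Prop := out = OrderKeys_alt Dict FactorNames
instance (Dict : List (String × Int)) (FactorNames : List String) (out : List String) : Decidable (Spec_OrderKeys Dict FactorNames out) := by unfold Spec_OrderKeys; infer_instance

-- ===== CLAIM (what is proved, stated in full; the proofs are below) =====
def Claim_equal_OrderKeys : Prop := ∀ (Dict : List (String × Int)) (FactorNames : List String), Dom_OrderKeys Dict FactorNames → Spec_OrderKeys Dict FactorNames (OrderKeys Dict FactorNames)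

-- ===== LEMMAS AND PROOFS =====

-- the bucketing fold computes exactly the six filters
lemma foldl_stepB (FN : List String) (l : List String)
    (fac eff grp ns st rest : List String) :
    l.foldl (stepB FN) (fac, eff, grp, ns, st, rest) =
      (fac ++ l.filter (fun k => pFac FN k),
       eff ++ l.filter (fun k => pEff k),
       grp ++ l.filter (fun k => pGrp k),
       ns ++ l.filter (fun k => pN k),
       st ++ l.filter (fun k => pStat k),
       rest ++ l.filter (fun k => !(pFac FN k || pEff k || pGrp k || pN k || pStat k))) := by
  induction l generalizing fac eff grp ns st rest with
  | nil => simp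
  | cons x xs ih =>
      simp only [List.foldl_cons, stepB, ih, List.filter_cons]
      refine Prod.ext ?_ (Prod.ext ?_ (Prod.ext ?_ (Prod.ext ?_ (Prod.ext ?_ ?_)))) <;>
        simp <;> split_ifs <;> simp_all

-- membership in A's accumulated Order after five segments
lemma mem_order5 (FN : List String) (Keys : List String) (k : String) :
    (srt (Keys.filter (fun k => pFac FN k)) ++ Keys.filter (fun k => pEff k) ++
     srt (Keys.filter (fun k => pGrp k)) ++ srt (Keys.filter (fun k => pN k)) ++
     srt (Keys.filter (fun k => pStat k))).contains k =
      ((k ∈ Keys : Bool) && (pFac FN k || pEff k || pGrp k || pN k || pStat k)) := by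
  simp [srt, List.mem_append, PySem.List.mem_sorted, List.mem_filter]
  cases decide (k ∈ Keys) <;> simp [Bool.or_assoc]

-- A's sixth comprehension ("not yet in Order") is the "no category matched" filter
lemma rest_eq (FN : List String) (Keys : List String) :
    Keys.filter (fun k =>
      !((srt (Keys.filter (fun k => pFac FN k)) ++ Keys.filter (fun k => pEff k) ++
         srt (Keys.filter (fun k => pGrp k)) ++ srt (Keys.filter (fun k => pN k)) ++
         srt (Keys.filter (fun k => pStat k))).contains k)) =
    Keys.filter (fun k => !(pFac FN k || pEff k || pGrp k || pN k || pStat k)) := by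
  apply List.filter_congr
  intro k hk
  rw [mem_order5]
  simp [hk]

-- ===== VERDICT (by name: the statement is the Claim_ definition above) =====
theorem OrderKeys_spec : Claim_equal_OrderKeys := by
  intro Dict FactorNames _
  show OrderKeys Dict FactorNames = OrderKeys_alt Dict FactorNames
  simp only [OrderKeys, OrderKeys_alt, foldl_stepB, List.nil_append]
  rw [rest_eq]
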